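-- pv_equiv track=rewrite | github.com/piotrszyma/aoc2023 | day12_part1.py | find_unknown_idx
-- ===== SOURCE A (Python) =====
-- def find_unknown_idx(value: str) -> int:
--     if "?" not in value:
--         assert "?" in value
--
--     idx = len(value) // 2
--     left_idx = idx
--     right_idx = idx + 1
--     while True:
--         if left_idx >= 0 and value[left_idx] == "?":
--             return left_idx
--
--         if right_idx < len(value) and value[right_idx] == "?":
--             return right_idx
--
--         left_idx -= 1
--         right_idx += 1
-- ===== SOURCE B (Python) =====
-- def find_unknown_idx(value: str) -> int:
--     assert "?" in value
--     idx = len(value) // 2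
--     qs = [p for p, c in enumerate(value) if c == "?"]
--     return min(qs, key=lambda p: 2 * (idx - p) if p <= idx else 2 * (p - idx) - 1)
-- ===== Notes on version B (the rewrite author's own statement) =====
-- stated objective: alternative
-- what changed: Replaces A's outward-expanding two-pointer scan from the string middle with a single linear pass that collects all '?' positions and returns the argmin of a centre-distance priority key (even keys for left-of-middle, odd for right, encoding the left-before-right tie-break).
import Mathlib
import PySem

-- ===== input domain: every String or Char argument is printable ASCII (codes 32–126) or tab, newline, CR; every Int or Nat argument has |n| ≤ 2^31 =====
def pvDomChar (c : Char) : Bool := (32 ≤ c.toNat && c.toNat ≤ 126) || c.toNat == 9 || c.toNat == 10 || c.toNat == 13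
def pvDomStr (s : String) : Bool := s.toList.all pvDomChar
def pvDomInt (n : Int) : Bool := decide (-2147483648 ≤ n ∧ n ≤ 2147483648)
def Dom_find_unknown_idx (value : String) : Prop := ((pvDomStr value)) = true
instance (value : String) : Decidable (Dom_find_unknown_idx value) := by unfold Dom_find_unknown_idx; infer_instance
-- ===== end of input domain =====

-- B replaces A's outward expanding two-pointer scan from the middle by a single linear
-- pass (collect all '?' positions, take the argmin of a centre-distance key); objective:
-- alternative decomposition, same O(n) cost.

-- ===== PORT A =====
-- the while-True loop; fuel bounds the iterations (≤ len+1 under Pre_, where it returns);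
-- fuel 0 returns a junk value on inputs Pre_ excludes
def pvLoopA (s : List Char) (left right : Int) : Nat → Int
  | 0 => 0
  | fuel + 1 =>
    if 0 ≤ left ∧ PySem.List.pyGet? s left = some '?' then left
    else if right < (s.length : Int) ∧ PySem.List.pyGet? s right = some '?' then right
    else pvLoopA s (left - 1) (right + 1) fuel

def find_unknown_idx (value : String) : Int :=
  let s := value.toList
  -- Python: `if "?" not in value: assert "?" in value` raises AssertionError when no '?';
  -- for the single-character needle, `"?" in value` is exactly '?' ∈ value.toList.
  if '?' ∈ s then
    let idx := PySem.Int.floordiv (s.length : Int) 2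
    pvLoopA s idx (idx + 1) (s.length + 1)
  else 0  -- AssertionError in Python; excluded by Pre_

-- ===== PORT B =====
def pvKey (idx p : Int) : Int := if p ≤ idx then 2 * (idx - p) else 2 * (p - idx) - 1

def find_unknown_idx_alt (value : String) : Int :=
  let s := value.toList
  if '?' ∈ s then
    let idx := PySem.Int.floordiv (s.length : Int) 2
    let qs := (PySem.List.enumerate s 0).filterMap
      (fun pc => if pc.2 = '?' then some pc.1 else none)
    (PySem.List.min? qs (pvKey idx)).getD 0   -- qs ≠ [] under the guard, so min? = some _
  else 0  -- AssertionError in Python; excluded by Pre_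

-- ===== PRECONDITION & SPEC =====
-- Pre_ excludes exactly the strings without '?', on which Python A (and B) raise AssertionError.
def Pre_find_unknown_idx (value : String) : Prop := '?' ∈ value.toList
instance (value : String) : Decidable (Pre_find_unknown_idx value) := by
  unfold Pre_find_unknown_idx; infer_instance

def pvWitness_find_unknown_idx : String := "a?b"

def Spec_find_unknown_idx (value : String) (out : Int) : Prop := out = find_unknown_idx_alt value
instance (value : String) (out : Int) : Decidable (Spec_find_unknown_idx value out) := by
  unfold Spec_find_unknown_idx; infer_instance

-- ===== CLAIM (what is proved, stated in full; the proofs are below) =====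
def Claim_equal_find_unknown_idx : Prop := ∀ (value : String), Dom_find_unknown_idx value → Pre_find_unknown_idx value → Spec_find_unknown_idx value (find_unknown_idx value)

-- ===== LEMMAS AND PROOFS =====

-- pyGet? at a nonnegative in-bounds index is plain indexing
lemma pvPyGet?_pos_elim (s : List Char) (i : Int) (c : Char) (h0 : 0 ≤ i)
    (h : PySem.List.pyGet? s i = some c) : i < (s.length : Int) ∧ s[i.toNat]? = some c := by
  simp only [PySem.List.pyGet?, PySem.List.pyIdx?, if_pos h0] at h
  split_ifs at h with hlt
  · simpa using ⟨hlt, by simpa using h⟩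
  · simp at h

lemma pvPyGet?_natCast' (s : List Char) (q : Nat) (hc : s[q]? = some '?') :
    PySem.List.pyGet? s (q : Int) = some '?' := by
  simpa [PySem.List.pyGet?_natCast] using hc

-- keys are injective: even on the left side, odd on the right side
lemma pvKey_inj (idx p1 p2 : Int) (h : pvKey idx p1 = pvKey idx p2) : p1 = p2 := by
  unfold pvKey at h; split_ifs at h <;> omega

-- the expanding loop returns the '?' position of minimal key
lemma pvLoopA_spec (s : List Char) (idx : Int) (h0idx : 0 ≤ idx) (fuel : Nat) :
    ∀ d : Nat,
    (∀ q : Nat, q < s.length → s[q]? = some '?' → pvKey idx q < 2 * (d + fuel)) →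
    (∀ q : Nat, q < s.length → s[q]? = some '?' → 2 * (d : Int) ≤ pvKey idx q) →
    (∃ q : Nat, q < s.length ∧ s[q]? = some '?') →
    ∃ r : Nat, pvLoopA s (idx - d) (idx + 1 + d) fuel = r ∧ r < s.length ∧ s[r]? = some '?' ∧
      ∀ q : Nat, q < s.length → s[q]? = some '?' → pvKey idx r ≤ pvKey idx q := by
  induction fuel with
  | zero =>
    intro d hfuel hinv hex
    obtain ⟨q, hq, hc⟩ := hex
    have h1 := hfuel q hq hc
    have h2 := hinv q hq hc
    omega
  | succ fuel ih =>
    intro d hfuel hinv hex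
    rw [pvLoopA]
    by_cases hL : 0 ≤ idx - (d : Int) ∧ PySem.List.pyGet? s (idx - (d : Int)) = some '?'
    · rw [if_pos hL]
      obtain ⟨hL0, hLg⟩ := hL
      obtain ⟨hlt, hget⟩ := pvPyGet?_pos_elim s _ _ hL0 hLg
      refine ⟨(idx - (d : Int)).toNat, by omega, by omega, by simpa using hget, ?_⟩
      intro q hq hc
      have hcast : ((idx - (d : Int)).toNat : Int) = idx - d := by omega
      have : pvKey idx ((idx - (d : Int)).toNat : Int) = 2 * d := by
        rw [hcast]; unfold pvKey; split_ifs <;> omega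
      rw [this]; exact hinv q hq hc
    · rw [if_neg hL]
      -- no '?' has key 2*d
      have hno2d : ∀ q : Nat, q < s.length → s[q]? = some '?' → pvKey idx (q : Int) ≠ 2 * d := by
        intro q hq hc heq
        have hkey : (q : Int) = idx - d := by
          unfold pvKey at heq; split_ifs at heq <;> omega
        exact hL ⟨by omega, by rw [← hkey]; exact pvPyGet?_natCast' s q hc⟩
      by_cases hR : idx + 1 + (d : Int) < (s.length : Int) ∧
          PySem.List.pyGet? s (idx + 1 + (d : Int)) = some '?'
      · rw [if_pos hR]
        obtain ⟨hRlt, hRg⟩ := hR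
        obtain ⟨_, hget⟩ := pvPyGet?_pos_elim s _ _ (by omega) hRg
        refine ⟨(idx + 1 + (d : Int)).toNat, by omega, by omega, by simpa using hget, ?_⟩
        intro q hq hc
        have hcast : ((idx + 1 + (d : Int)).toNat : Int) = idx + 1 + d := by omega
        have hk : pvKey idx ((idx + 1 + (d : Int)).toNat : Int) = 2 * d + 1 := by
          rw [hcast]; unfold pvKey; split_ifs <;> omega
        rw [hk]
        have := hinv q hq hc
        have := hno2d q hq hc
        omega
      · rw [if_neg hR]
        have harg1 : idx - (d : Int) - 1 = idx - ((d + 1 : Nat) : Int) := by push_cast; ring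
        have harg2 : idx + 1 + (d : Int) + 1 = idx + 1 + ((d + 1 : Nat) : Int) := by
          push_cast; ring
        rw [harg1, harg2]
        -- no '?' has key 2*d + 1 either
        have hno2d1 : ∀ q : Nat, q < s.length → s[q]? = some '?' →
            pvKey idx (q : Int) ≠ 2 * d + 1 := by
          intro q hq hc heq
          have hkey : (q : Int) = idx + 1 + d := by
            unfold pvKey at heq; split_ifs at heq <;> omega
          exact hR ⟨by omega, by rw [← hkey]; exact pvPyGet?_natCast' s q hc⟩
        refine ih (d + 1) (fun q hq hc => by have := hfuel q hq hc; push_cast; push_cast at this; omega)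
          (fun q hq hc => ?_) hex
        have := hinv q hq hc
        have := hno2d q hq hc
        have := hno2d1 q hq hc
        push_cast
        omega

-- membership in B's comprehension over enumerate
lemma pvMem_qs (s : List Char) (start p : Int) :
    p ∈ (PySem.List.enumerate s start).filterMap
        (fun pc => if pc.2 = '?' then some pc.1 else none) ↔
      ∃ q : Nat, q < s.length ∧ s[q]? = some '?' ∧ p = start + q := by
  induction s generalizing start with
  | nil => simp [PySem.List.enumerate_nil]
  | cons x xs ih =>
    rw [PySem.List.enumerate_cons]
    by_cases hx : x = '?'
    · simp only [List.filterMap_cons, hx, if_true, List.mem_cons]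
      rw [ih (start + 1)]
      constructor
      · rintro (rfl | ⟨q, hq, hc, hp⟩)
        · exact ⟨0, by simp, by simp, by omega⟩
        · exact ⟨q + 1, by simp only [List.length_cons]; omega,
            by simpa using hc, by push_cast; omega⟩
      · rintro ⟨q, hq, hc, hp⟩
        cases q with
        | zero => left; omega
        | succ q =>
          right
          exact ⟨q, by simp only [List.length_cons] at hq; omega,
            by simpa using hc, by omega⟩
    · simp only [List.filterMap_cons, if_neg (show ¬((start, x).2 = '?') from hx)]
      rw [ih (start + 1)]
      constructor
      · rintro ⟨q, hq, hc, hp⟩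
        exact ⟨q + 1, by simp only [List.length_cons]; omega,
          by simpa using hc, by push_cast; omega⟩
      · rintro ⟨q, hq, hc, hp⟩
        cases q with
        | zero => exact absurd (by simpa using hc) hx
        | succ q =>
          exact ⟨q, by simp only [List.length_cons] at hq; omega,
            by simpa using hc, by omega⟩

-- A returns a '?' position of minimal key
lemma pvA_spec (value : String) (h : '?' ∈ value.toList) :
    ∃ r : Nat, find_unknown_idx value = r ∧ r < value.toList.length ∧
      value.toList[r]? = some '?' ∧
      ∀ q : Nat, q < value.toList.length → value.toList[q]? = some '?' →
        pvKey (PySem.Int.floordiv (value.toList.length : Int) 2) r ≤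
        pvKey (PySem.Int.floordiv (value.toList.length : Int) 2) q := by
  set s := value.toList with hs
  set n := s.length with hn
  have hidx : PySem.Int.floordiv (n : Int) 2 = ((n / 2 : Nat) : Int) := by
    exact_mod_cast PySem.Int.floordiv_natCast n 2
  obtain ⟨q0, hq0, hc0⟩ := List.getElem_of_mem h
  have hex : ∃ q : Nat, q < n ∧ s[q]? = some '?' :=
    ⟨q0, hq0, by rw [List.getElem?_eq_getElem hq0, hc0]⟩
  have hspec := pvLoopA_spec s (PySem.Int.floordiv (n : Int) 2) (by rw [hidx]; positivity)
    (n + 1) 0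
    (fun q hq hc => by
      rw [hidx]; unfold pvKey; have h2 : n / 2 * 2 ≤ n := Nat.div_mul_le_self n 2
      split_ifs <;> push_cast <;> omega)
    (fun q hq hc => by
      rw [hidx]; unfold pvKey; split_ifs <;> push_cast <;> omega)
    hex
  obtain ⟨r, hr, hrlt, hrc, hrmin⟩ := hspec
  refine ⟨r, ?_, hrlt, hrc, hrmin⟩
  unfold find_unknown_idx
  rw [← hs, if_pos h]
  simpa using hr

-- B returns a '?' position of minimal key
lemma pvB_spec (value : String) (h : '?' ∈ value.toList) :
    ∃ r : Nat, find_unknown_idx_alt value = r ∧ r < value.toList.length ∧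
      value.toList[r]? = some '?' ∧
      ∀ q : Nat, q < value.toList.length → value.toList[q]? = some '?' →
        pvKey (PySem.Int.floordiv (value.toList.length : Int) 2) r ≤
        pvKey (PySem.Int.floordiv (value.toList.length : Int) 2) q := by
  set s := value.toList with hs
  set idx := PySem.Int.floordiv (s.length : Int) 2 with hidx
  set qs := (PySem.List.enumerate s 0).filterMap
    (fun pc => if pc.2 = '?' then some pc.1 else none) with hqs
  obtain ⟨q0, hq0, hc0⟩ := List.getElem_of_mem h
  have hc0' : s[q0]? = some '?' := by rw [List.getElem?_eq_getElem hq0, hc0]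
  have hqs_ne : qs ≠ [] := by
    intro hnil
    have : (q0 : Int) ∈ qs := (pvMem_qs s 0 q0).mpr ⟨q0, hq0, hc0', by omega⟩
    rw [hnil] at this; simp at this
  obtain ⟨m, hm⟩ : ∃ m, PySem.List.min? qs (pvKey idx) = some m := by
    cases hcase : PySem.List.min? qs (pvKey idx) with
    | none => exact absurd ((PySem.List.min?_eq_none_iff qs (pvKey idx)).mp hcase) hqs_ne
    | some m => exact ⟨m, rfl⟩
  have hmmem := PySem.List.min?_mem hm
  obtain ⟨rm, hrmlt, hrmc, hrm⟩ := (pvMem_qs s 0 m).mp hmmem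
  have hmin := PySem.List.min?_isMin hm
  refine ⟨rm, ?_, hrmlt, hrmc, ?_⟩
  · unfold find_unknown_idx_alt
    rw [← hs, if_pos h]
    simp only [← hidx, ← hqs, hm, Option.getD_some]
    omega
  · intro q hq hc
    have hqmem : (q : Int) ∈ qs := (pvMem_qs s 0 q).mpr ⟨q, hq, hc, by omega⟩
    have := hmin _ hqmem
    have hrw : m = (rm : Int) := by omega
    rwa [← hrw]

-- ===== VERDICT (by name: the statement is the Claim_ definition above) =====
theorem find_unknown_idx_spec : Claim_equal_find_unknown_idx := by
  intro value _ hpre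
  unfold Spec_find_unknown_idx
  have h : '?' ∈ value.toList := hpre
  obtain ⟨ra, hA, hralt, hrac, hramin⟩ := pvA_spec value h
  obtain ⟨rb, hB, hrblt, hrbc, hrbmin⟩ := pvB_spec value h
  have h1 := hramin rb hrblt hrbc
  have h2 := hrbmin ra hralt hrac
  have hk : pvKey (PySem.Int.floordiv (value.toList.length : Int) 2) ra =
      pvKey (PySem.Int.floordiv (value.toList.length : Int) 2) rb := le_antisymm h1 h2
  have := pvKey_inj _ _ _ hk
  rw [hA, hB]
  omega
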